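-- pv_equiv track=rewrite | github.com/9KICKS/myPythonJourney | class_exercises/highest_common_factor.py | get_highest_common_factor
-- ===== SOURCE A (Python) =====
-- def get_highest_common_factor(user_numbers, **kwargs):
--     first_default_value = 0
--     second_default_value = 0
--     first_argument = kwargs.get('arg1', first_default_value)
--     second_argument = kwargs.get('arg2', second_default_value)
--     if len(user_numbers) == 0:
--         return None
--     highest_common_factor = user_numbers[0]
--     for number in user_numbers:
--         highest_common_factor = get_greatest_common_divisor(highest_common_factor, number)
--     return get_prime_factors(highest_common_factor)
--
-- def get_greatest_common_divisor(x, y):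
--     if y == 0:
--         return x
--     return get_greatest_common_divisor(y, x % y)
--
-- def get_prime_factors(number):
--     i = 2
--     factors = []
--     while i <= number:
--         if number % i == 0:
--             number //= i
--             factors.append(i)
--         else:
--             i += 1
--     if number > 1:
--         factors.append(number)
--     return factors
-- ===== SOURCE B (Python) =====
-- def get_highest_common_factor(user_numbers, **kwargs):
--     if not user_numbers:
--         return None
--     g = user_numbers[0]
--     for m in user_numbers[1:]:
--         while m != 0:
--             g, m = m, g % m
--     return _prime_factors(g)
--
-- def _prime_factors(n):
--     out = []
--     i = 2
--     while i <= n: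
--         while n % i == 0:
--             out.append(i)
--             n //= i
--         i += 1
--     if n > 1:
--         out.append(n)
--     return out
-- ===== Notes on version B (the rewrite author's own statement) =====
-- stated objective: alternative
-- what changed: B replaces the tail-recursive GCD by an inline iterative Euclidean loop folded over the tail only, and replaces A's single trial-division loop with conditional increment by a nested loop that divides out each candidate factor completely before incrementing.
import Mathlib
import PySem

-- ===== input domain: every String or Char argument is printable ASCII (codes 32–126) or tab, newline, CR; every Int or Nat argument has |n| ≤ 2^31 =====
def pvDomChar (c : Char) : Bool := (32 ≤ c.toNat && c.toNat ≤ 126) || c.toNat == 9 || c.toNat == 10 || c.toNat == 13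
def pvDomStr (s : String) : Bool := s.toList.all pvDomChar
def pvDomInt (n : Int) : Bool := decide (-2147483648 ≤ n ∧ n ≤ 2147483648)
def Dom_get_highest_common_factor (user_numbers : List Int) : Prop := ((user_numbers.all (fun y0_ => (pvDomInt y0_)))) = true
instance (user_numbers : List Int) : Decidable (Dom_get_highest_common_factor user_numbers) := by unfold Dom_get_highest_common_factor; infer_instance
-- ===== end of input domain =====

-- B differs from A in decomposition only: an iterative Euclidean GCD folded over the tail of the
-- list, and a nested trial-division loop that divides out each candidate completely before
-- incrementing it; same return value everywhere (A is total on List Int).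
-- Loops are ported with a Nat fuel parameter (a totality device only: the stated fuel is always
-- sufficient, and the fuel-0 base carries the loop-exit code, so it is never observed short).

-- ===== PORT A =====
-- A's recursive Euclid: if y == 0: return x; return gcd(y, x % y)
def pvGcdLoopA : Nat → Int → Int → Int
  | 0, x, _ => x
  | f + 1, x, y => if y = 0 then x else pvGcdLoopA f y (PySem.Int.mod x y)

def get_greatest_common_divisor (x y : Int) : Int := pvGcdLoopA (y.natAbs + 1) x y

-- A's while loop: while i <= number: if divisible, append i and divide; else i += 1;
-- the post-loop 'if number > 1: append' is the loop-exit code (also the fuel-0 base).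
def pvFactLoopA : Nat → Int → Int → List Int → List Int
  | 0, _, n, acc => if n > 1 then acc ++ [n] else acc
  | f + 1, i, n, acc =>
    if i ≤ n then
      if PySem.Int.mod n i = 0 then pvFactLoopA f i (PySem.Int.floordiv n i) (acc ++ [i])
      else pvFactLoopA f (i + 1) n acc
    else if n > 1 then acc ++ [n] else acc

def get_prime_factors (number : Int) : List Int := pvFactLoopA (2 * number.toNat + 1) 2 number []

def get_highest_common_factor (user_numbers : List Int) : Option (List Int) :=
  match user_numbers with
  | [] => none
  | x :: _ =>
    some (get_prime_factors (user_numbers.foldl get_greatest_common_divisor x))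

-- ===== PORT B =====
-- B's inline iterative Euclid: while m != 0: g, m = m, g % m
def pvGcdLoopB : Nat → Int → Int → Int
  | 0, g, _ => g
  | f + 1, g, m => if m ≠ 0 then pvGcdLoopB f m (PySem.Int.mod g m) else g

def pvGcdB (g m : Int) : Int := pvGcdLoopB (m.natAbs + 1) g m

-- B's inner loop: while n % i == 0: append i; n //= i   (returns appended factors, reduced n)
def pvDivAllB : Nat → Int → Int → List Int × Int
  | 0, _, n => ([], n)
  | f + 1, i, n =>
    if PySem.Int.mod n i = 0 then
      let p := pvDivAllB f i (PySem.Int.floordiv n i)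
      (i :: p.1, p.2)
    else ([], n)

-- B's outer loop: while i <= n: <inner loop>; i += 1, then the final 'if n > 1: append n'
def pvOuterB : Nat → Int → Int → List Int → List Int
  | 0, _, n, acc => if n > 1 then acc ++ [n] else acc
  | f + 1, i, n, acc =>
    if i ≤ n then
      let p := pvDivAllB n.toNat i n
      pvOuterB f (i + 1) p.2 (acc ++ p.1)
    else if n > 1 then acc ++ [n] else acc

def pvFactorsB (n : Int) : List Int := pvOuterB n.toNat 2 n []

def get_highest_common_factor_alt (user_numbers : List Int) : Option (List Int) :=
  match user_numbers with
  | [] => none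
  | x :: rest => some (pvFactorsB (rest.foldl pvGcdB x))

-- ===== PRECONDITION & SPEC =====
def Spec_get_highest_common_factor (user_numbers : List Int) (out : Option (List Int)) : Prop := out = get_highest_common_factor_alt user_numbers
instance (user_numbers : List Int) (out : Option (List Int)) : Decidable (Spec_get_highest_common_factor user_numbers out) := by unfold Spec_get_highest_common_factor; infer_instance

-- ===== CLAIM (what is proved, stated in full; the proofs are below) =====
def Claim_equal_get_highest_common_factor : Prop := ∀ (user_numbers : List Int), Dom_get_highest_common_factor user_numbers → Spec_get_highest_common_factor user_numbers (get_highest_common_factor user_numbers)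

-- ===== LEMMAS AND PROOFS =====

theorem pvModSelf (x : Int) : PySem.Int.mod x x = 0 :=
  (PySem.Int.mod_eq_zero_iff_dvd x x).mpr dvd_rfl

theorem pvDivShrink (i n : Int) (hi : 2 ≤ i) (hn : 1 ≤ n) (hm : PySem.Int.mod n i = 0) :
    1 ≤ PySem.Int.floordiv n i ∧ PySem.Int.floordiv n i < n := by
  obtain ⟨k, hk⟩ := (PySem.Int.mod_eq_zero_iff_dvd n i).mp hm
  have hfd : PySem.Int.floordiv n i = k := by
    rw [PySem.Int.floordiv_eq_ediv_of_pos (by omega : (0:Int) < i), hk,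
      Int.mul_ediv_cancel_left _ (by omega : i ≠ 0)]
  have hk1 : 1 ≤ k := by nlinarith
  have hkn : k < n := by nlinarith
  omega

theorem pvNotDvdLtSelf (i c : Int) (hi : 2 ≤ i) (hc1 : 1 ≤ c) (hci : c < i) :
    ¬ PySem.Int.mod c i = 0 := by
  intro hmc
  obtain ⟨d, hd⟩ := (PySem.Int.mod_eq_zero_iff_dvd c i).mp hmc
  have hd1 : 1 ≤ d := by nlinarith
  nlinarith

theorem pvGcdLoops_eq : ∀ (f : Nat) (x y : Int), pvGcdLoopA f x y = pvGcdLoopB f x y := by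
  intro f
  induction f with
  | zero => intro x y; rfl
  | succ f ih =>
    intro x y
    simp only [pvGcdLoopA, pvGcdLoopB]
    by_cases h : y = 0
    · simp [h]
    · simp [h, ih]


theorem gcd_ports_eq (x y : Int) : get_greatest_common_divisor x y = pvGcdB x y :=
  pvGcdLoops_eq (y.natAbs + 1) x y

theorem gcd_self (x : Int) : get_greatest_common_divisor x x = x := by
  unfold get_greatest_common_divisor
  by_cases h : x = 0
  · subst h; rfl
  · obtain ⟨j, hj⟩ : ∃ j, x.natAbs = j + 1 := ⟨x.natAbs - 1, by omega⟩
    rw [hj]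
    simp [pvGcdLoopA, h, pvModSelf]

theorem pvDivAllB_notdvd (f : Nat) (i n : Int) (hm : ¬ PySem.Int.mod n i = 0) :
    pvDivAllB f i n = ([], n) := by
  cases f <;> simp [pvDivAllB, hm]

theorem pvDivAllB_le : ∀ (f : Nat) (i n : Int), 2 ≤ i → 1 ≤ n →
    (pvDivAllB f i n).2 ≤ n ∧ 1 ≤ (pvDivAllB f i n).2 := by
  intro f
  induction f with
  | zero => intro i n _ hn; simp [pvDivAllB]; omega
  | succ f ih =>
    intro i n hi hn
    by_cases hm : PySem.Int.mod n i = 0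
    · have hs := pvDivShrink i n hi hn hm
      have := ih i (PySem.Int.floordiv n i) hi (by omega)
      simp only [pvDivAllB, hm, if_pos]
      constructor <;> omega
    · simp [pvDivAllB, hm]; omega

theorem pvDivAllB_irrel : ∀ (f g : Nat) (i n : Int), 2 ≤ i → 1 ≤ n →
    n.toNat ≤ f → n.toNat ≤ g → pvDivAllB f i n = pvDivAllB g i n := by
  intro f
  induction f with
  | zero => intro g i n _ hn hf _; omega
  | succ f ih =>
    intro g i n hi hn hf hg
    obtain ⟨g', rfl⟩ : ∃ g', g = g' + 1 := ⟨g - 1, by omega⟩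
    by_cases hm : PySem.Int.mod n i = 0
    · have hs := pvDivShrink i n hi hn hm
      simp only [pvDivAllB, hm, if_pos]
      rw [ih g' i (PySem.Int.floordiv n i) hi (by omega) (by omega) (by omega)]
    · simp [pvDivAllB, hm]

theorem pvOuterB_irrel : ∀ (f g : Nat) (i n : Int) (acc : List Int), 2 ≤ i →
    (n + 1 - i).toNat ≤ f → (n + 1 - i).toNat ≤ g → pvOuterB f i n acc = pvOuterB g i n acc := by
  intro f
  induction f with
  | zero =>
    intro g i n acc hi hf _
    have hin : ¬ i ≤ n := by omega
    cases g <;> simp [pvOuterB, hin]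
  | succ f ih =>
    intro g i n acc hi hf hg
    by_cases hin : i ≤ n
    · obtain ⟨g', rfl⟩ : ∃ g', g = g' + 1 := ⟨g - 1, by omega⟩
      simp only [pvOuterB, hin, if_pos]
      have hp := pvDivAllB_le n.toNat i n hi (by omega)
      exact ih g' (i + 1) (pvDivAllB n.toNat i n).2 _ (by omega) (by omega) (by omega)
    · cases g <;> simp [pvOuterB, hin]

theorem pvOuterB_step (f f' : Nat) (i n : Int) (acc : List Int) (hi : 2 ≤ i) (hin : i ≤ n)
    (hm : PySem.Int.mod n i = 0)
    (hf : (n + 1 - i).toNat ≤ f) (hf' : (PySem.Int.floordiv n i + 1 - i).toNat ≤ f') :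
    pvOuterB f i n acc = pvOuterB f' i (PySem.Int.floordiv n i) (acc ++ [i]) := by
  have hs := pvDivShrink i n hi (by omega) hm
  set c := PySem.Int.floordiv n i with hc
  obtain ⟨g, rfl⟩ : ∃ g, f = g + 1 := ⟨f - 1, by omega⟩
  obtain ⟨m, hm'⟩ : ∃ m, n.toNat = m + 1 := ⟨n.toNat - 1, by omega⟩
  have hdc : pvDivAllB n.toNat i n = (i :: (pvDivAllB c.toNat i c).1, (pvDivAllB c.toNat i c).2) := by
    rw [hm']
    simp only [pvDivAllB, hm, if_pos]
    rw [pvDivAllB_irrel m c.toNat i c hi (by omega) (by omega) (by omega)]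
  have hple := pvDivAllB_le c.toNat i c hi (by omega)
  simp only [pvOuterB, hin, if_pos, hdc]
  by_cases hik : i ≤ c
  · obtain ⟨g', rfl⟩ : ∃ g', f' = g' + 1 := ⟨f' - 1, by omega⟩
    simp only [pvOuterB, hik, if_pos]
    rw [show acc ++ i :: (pvDivAllB c.toNat i c).1 = (acc ++ [i]) ++ (pvDivAllB c.toNat i c).1 by simp]
    exact pvOuterB_irrel g g' (i + 1) (pvDivAllB c.toNat i c).2 _ (by omega) (by omega) (by omega)
  · have hmc := pvNotDvdLtSelf i c hi (by omega) (by omega)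
    rw [pvDivAllB_notdvd c.toNat i c hmc]
    cases g <;> cases f' <;>
      simp [pvOuterB, hik, (show ¬ i + 1 ≤ c by omega)]

theorem loops_eq : ∀ (f f' : Nat) (i n : Int) (acc : List Int), 2 ≤ i →
    (n - i).toNat + n.toNat ≤ f → (n + 1 - i).toNat ≤ f' →
    pvFactLoopA f i n acc = pvOuterB f' i n acc := by
  intro f
  induction f with
  | zero =>
    intro f' i n acc hi hf _
    have hin : ¬ i ≤ n := by omega
    cases f' <;> simp [pvFactLoopA, pvOuterB, hin]
  | succ f ih =>
    intro f' i n acc hi hf hf'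
    by_cases hin : i ≤ n
    · by_cases hm : PySem.Int.mod n i = 0
      · have hs := pvDivShrink i n hi (by omega) hm
        simp only [pvFactLoopA, hin, hm, if_pos]
        rw [pvOuterB_step f' ((PySem.Int.floordiv n i + 1 - i).toNat) i n acc hi hin hm hf' le_rfl]
        exact ih _ i (PySem.Int.floordiv n i) (acc ++ [i]) hi (by omega) le_rfl
      · have hne : i ≠ n := by intro he; subst he; exact hm (pvModSelf i)
        simp only [pvFactLoopA, hin, hm, if_pos]
        obtain ⟨g, rfl⟩ : ∃ g, f' = g + 1 := ⟨f' - 1, by omega⟩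
        have hR : pvOuterB (g + 1) i n acc = pvOuterB g (i + 1) n acc := by
          simp only [pvOuterB, hin, if_pos]
          rw [pvDivAllB_notdvd n.toNat i n hm]
          simp
        rw [hR]
        exact ih g (i + 1) n acc (by omega) (by omega) (by omega)
    · cases f' <;> simp [pvFactLoopA, pvOuterB, hin]

theorem factors_eq (n : Int) : get_prime_factors n = pvFactorsB n := by
  unfold get_prime_factors pvFactorsB
  exact loops_eq (2 * n.toNat + 1) n.toNat 2 n [] (by omega) (by omega) (by omega)

theorem foldl_gcd_head (x : Int) (rest : List Int) :
    List.foldl get_greatest_common_divisor x (x :: rest) = List.foldl pvGcdB x rest := by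
  have hfun : ∀ (l : List Int) (a : Int),
      List.foldl get_greatest_common_divisor a l = List.foldl pvGcdB a l := by
    intro l; induction l with
    | nil => intro a; rfl
    | cons b t ihl => intro a; simp only [List.foldl, gcd_ports_eq, ihl]
  simp only [List.foldl, gcd_self]
  exact hfun rest x

-- ===== VERDICT (by name: the statement is the Claim_ definition above) =====
theorem get_highest_common_factor_spec : Claim_equal_get_highest_common_factor := by
  intro u _
  unfold Spec_get_highest_common_factor
  cases u with
  | nil => rfl
  | cons x rest =>
    simp only [get_highest_common_factor, get_highest_common_factor_alt]
    rw [foldl_gcd_head, factors_eq]
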